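-- pv_equiv track=rewrite | github.com/InsightSoftwareConsortium/ITK | Wrapping/Generators/SwigInterface/igenerator.py | type_and_decorators
-- ===== SOURCE A (Python) =====
-- def type_and_decorators(s):
--     end = ""
--     s = s.strip()
--     ends = [" ", "*", "&", "const"]
--     needToContinue = True
--     while needToContinue:
--         needToContinue = False
--         for e in ends:
--             if s.endswith(e):
--                 end = e + end
--                 s = s[: -len(e)]
--                 needToContinue = True
--     return (s, end)
-- ===== SOURCE B (Python) =====
-- def type_and_decorators(s):
--     # Single backward index scan: greedily peel trailing ' ', '*', '&', 'const'
--     # tokens by moving an index, then split once; no repeated string slicing.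
--     s = s.strip()
--     i = len(s)
--     while i > 0:
--         if s[i - 1] in " *&":
--             i -= 1
--         elif i >= 5 and s[i - 5 : i] == "const":
--             i -= 5
--         else:
--             break
--     return (s[:i], s[i:])
-- ===== Notes on version B (the rewrite author's own statement) =====
-- stated objective: alternative
-- what changed: Replaces A's fixpoint loop that repeatedly re-scans and re-slices the string (building the suffix by string concatenation) with a single backward index scan that finds the split point and then slices once.
import Mathlib
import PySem

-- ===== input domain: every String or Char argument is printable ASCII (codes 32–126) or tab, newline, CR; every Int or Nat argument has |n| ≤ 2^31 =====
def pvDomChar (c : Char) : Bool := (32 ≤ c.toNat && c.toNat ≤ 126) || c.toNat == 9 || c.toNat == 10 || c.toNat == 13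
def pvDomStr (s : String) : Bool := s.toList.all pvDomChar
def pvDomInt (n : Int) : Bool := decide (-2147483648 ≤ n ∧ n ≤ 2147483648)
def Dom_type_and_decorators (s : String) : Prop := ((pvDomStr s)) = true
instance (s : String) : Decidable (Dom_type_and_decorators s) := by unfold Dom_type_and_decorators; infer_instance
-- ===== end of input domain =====

-- B replaces A's repeated strip-and-reslice fixpoint loop by a single backward
-- index scan followed by one split (objective: alternative; same return values).

-- ===== PORT A =====
-- ends = [" ", "*", "&", "const"]  (strings as List Char)
def pvTokens : List (List Char) := [[' '], ['*'], ['&'], ['c','o','n','s','t']]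

-- one 'if s.endswith(e): end = e + end; s = s[:-len(e)]; needToContinue = True' step
def pvStrip1 (st : List Char × List Char × Bool) (e : List Char) : List Char × List Char × Bool :=
  match st with
  | (s, en, f) =>
    if PySem.Chars.endswith s e then
      (PySem.List.slice s none (some (-(e.length : Int))), e ++ en, true)
    else (s, en, f)

-- one iteration of the while body: 'for e in ends: …' starting from needToContinue = False
def pvPassA (s en : List Char) : List Char × List Char × Bool :=
  pvTokens.foldl pvStrip1 (s, en, false)

-- the while loop; fuel: every flagged pass shortens s, so length+1 passes suffice
def pvLoopA : Nat → List Char × List Char → List Char × List Char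
  | 0, st => st
  | fuel+1, (s, en) =>
    match pvPassA s en with
    | (s', en', f) => if f then pvLoopA fuel (s', en') else (s', en')

def type_and_decorators (s : String) : String × String :=
  let t := (PySem.Str.strip s).toList
  let r := pvLoopA (t.length + 1) (t, [])
  (String.ofList r.1, String.ofList r.2)

-- ===== PORT B =====
-- backward scan: pvLoopB t i is Source B's final i when the while loop starts at index i
-- (Lean pattern i+1 is Python's i; s[i-1] is s.getD i here, in range at every call)
def pvLoopB (s : List Char) : Nat → Nat
  | 0 => 0
  | i+1 =>
    let c := s.getD i ' '
    if c = ' ' ∨ c = '*' ∨ c = '&' then pvLoopB s i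
    else if 4 ≤ i ∧ (s.drop (i-4)).take 5 = ['c','o','n','s','t'] then pvLoopB s (i-4)
    else i+1
  termination_by i => i
  decreasing_by all_goals omega

def type_and_decorators_alt (s : String) : String × String :=
  let t := (PySem.Str.strip s).toList
  let i := pvLoopB t t.length
  (String.ofList (t.take i), String.ofList (t.drop i))  -- s[:i], s[i:] with 0 ≤ i ≤ len t

-- ===== PRECONDITION & SPEC =====
def Spec_type_and_decorators (s : String) (out : String × String) : Prop := out = type_and_decorators_alt s
instance (s : String) (out : String × String) : Decidable (Spec_type_and_decorators s out) := by unfold Spec_type_and_decorators; infer_instance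

-- ===== CLAIM (what is proved, stated in full; the proofs are below) =====
def Claim_equal_type_and_decorators : Prop := ∀ (s : String), Dom_type_and_decorators s → Spec_type_and_decorators s (type_and_decorators s)

-- ===== LEMMAS AND PROOFS =====

-- B's split point for the whole (stripped) string
def pvK (s : List Char) : Nat := pvLoopB s s.length

-- the final answer of the remaining A-loop as a function of the current state
def pvF (s en : List Char) : List Char × List Char :=
  (s.take (pvK s), s.drop (pvK s) ++ en)

lemma pvLoopB_le (s : List Char) (i : Nat) : pvLoopB s i ≤ i := by
  fun_induction pvLoopB s i <;> omega

-- characters at or beyond index i do not affect the scan from i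
lemma pvLoopB_append (s d : List Char) : ∀ i, i ≤ s.length → pvLoopB (s ++ d) i = pvLoopB s i := by
  intro i
  induction i using Nat.strong_induction_on with
  | _ i ih =>
    intro h
    match i with
    | 0 => simp [pvLoopB]
    | i+1 =>
      rw [pvLoopB, pvLoopB]
      have hg : (s ++ d).getD i ' ' = s.getD i ' ' :=
        List.getD_append s d ' ' i (by omega)
      by_cases h4 : 4 ≤ i
      · have hseg : ((s ++ d).drop (i-4)).take 5 = (s.drop (i-4)).take 5 := by
          rw [List.drop_append_of_le_length (by omega),
              List.take_append_of_le_length (by simp; omega)]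
        simp only [hg, hseg]
        split
        · exact ih i (by omega) (by omega)
        · split
          · exact ih (i-4) (by omega) (by omega)
          · rfl
      · simp only [hg]
        split
        · exact ih i (by omega) (by omega)
        · rw [if_neg (fun hh => h4 hh.1), if_neg (fun hh => h4 hh.1)]

-- peeling one trailing token does not move B's split point
lemma pvK_append_token (s e : List Char) (he : e ∈ pvTokens) :
    pvK (s ++ e) = pvK s := by
  simp only [pvTokens, List.mem_cons, List.not_mem_nil, or_false] at he
  unfold pvK
  rcases he with rfl | rfl | rfl | rfl
  · rw [show (s ++ [' ']).length = s.length + 1 by simp, pvLoopB]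
    simp [List.getD, pvLoopB_append s [' '] s.length le_rfl]
  · rw [show (s ++ ['*']).length = s.length + 1 by simp, pvLoopB]
    simp [List.getD, pvLoopB_append s ['*'] s.length le_rfl]
  · rw [show (s ++ ['&']).length = s.length + 1 by simp, pvLoopB]
    simp [List.getD, pvLoopB_append s ['&'] s.length le_rfl]
  · rw [show (s ++ ['c','o','n','s','t']).length = (s.length + 4) + 1 by simp, pvLoopB]
    have hg : (s ++ ['c','o','n','s','t']).getD (s.length + 4) ' ' = 't' := by
      simp [List.getD]
    have hseg : ((s ++ ['c','o','n','s','t']).drop (s.length + 4 - 4)).take 5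
        = ['c','o','n','s','t'] := by
      rw [show s.length + 4 - 4 = s.length by omega, List.drop_left]
      decide
    rw [hg]
    rw [if_neg (by decide), if_pos ⟨by omega, hseg⟩,
        show s.length + 4 - 4 = s.length by omega,
        pvLoopB_append s ['c','o','n','s','t'] s.length le_rfl]

-- if no token is a suffix, B's scan stops immediately
lemma pvK_fix (s : List Char)
    (h : ∀ e ∈ pvTokens, PySem.Chars.endswith s e = false) :
    pvK s = s.length := by
  have hns : ∀ e ∈ pvTokens, ¬ (e <:+ s) := by
    intro e he hsuf
    have := (PySem.Chars.endswith_iff s e).mpr hsuf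
    rw [h e he] at this; exact absurd this (by simp)
  rcases s.eq_nil_or_concat with rfl | ⟨s₀, c, rfl⟩
  · simp [pvK, pvLoopB]
  · simp only [List.concat_eq_append] at h hns ⊢
    unfold pvK
    rw [show (s₀ ++ [c]).length = s₀.length + 1 by simp, pvLoopB]
    have hg : (s₀ ++ [c]).getD s₀.length ' ' = c := by simp [List.getD]
    rw [hg]
    have hc : ¬ (c = ' ' ∨ c = '*' ∨ c = '&') := by
      rintro (rfl | rfl | rfl)
      · exact hns [' '] (by simp [pvTokens]) ⟨s₀, rfl⟩
      · exact hns ['*'] (by simp [pvTokens]) ⟨s₀, rfl⟩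
      · exact hns ['&'] (by simp [pvTokens]) ⟨s₀, rfl⟩
    have hconst : ¬ (4 ≤ s₀.length ∧
        ((s₀ ++ [c]).drop (s₀.length - 4)).take 5 = ['c','o','n','s','t']) := by
      rintro ⟨h4, hseg⟩
      have hlen : ((s₀ ++ [c]).drop (s₀.length - 4)).length = 5 := by simp; omega
      rw [List.take_of_length_le (by omega)] at hseg
      exact hns ['c','o','n','s','t'] (by simp [pvTokens])
        (hseg ▸ List.drop_suffix (s₀.length - 4) (s₀ ++ [c]))
    rw [if_neg hc, if_neg hconst]

-- tokens are nonempty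
lemma pvTokens_ne (e : List Char) (he : e ∈ pvTokens) : 0 < e.length := by
  simp only [pvTokens, List.mem_cons, List.not_mem_nil, or_false] at he
  rcases he with rfl | rfl | rfl | rfl <;> simp

-- the invariant carried through one pass (S,E = state at the start of the pass)
def pvQ (S E : List Char) (st : List Char × List Char × Bool) : Prop :=
  pvF st.1 st.2.1 = pvF S E ∧
    ((st.2.2 = true ∧ st.1.length < S.length) ∨ (st.2.2 = false ∧ st.1 = S ∧ st.2.1 = E))

lemma pvStrip1_Q (S E : List Char) (st : List Char × List Char × Bool) (e : List Char)
    (he : e ∈ pvTokens) (hq : pvQ S E st) : pvQ S E (pvStrip1 st e) := by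
  obtain ⟨s, en, f⟩ := st
  unfold pvQ at hq ⊢
  by_cases hew : PySem.Chars.endswith s e
  · obtain ⟨s₀, rfl⟩ : ∃ s₀, s = s₀ ++ e := by
      obtain ⟨t, ht⟩ := (PySem.Chars.endswith_iff s e).mp hew
      exact ⟨t, ht.symm⟩
    have hepos := pvTokens_ne e he
    have hslice : PySem.List.slice (s₀ ++ e) none (some (-(e.length : Int))) = s₀ := by
      rw [PySem.List.slice_to_neg_natCast _ _ hepos,
          show (s₀ ++ e).length - e.length = s₀.length by simp, List.take_left]
    have hK := pvK_append_token s₀ e he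
    have hKle : pvK s₀ ≤ s₀.length := pvLoopB_le s₀ s₀.length
    have hF : pvF s₀ (e ++ en) = pvF (s₀ ++ e) en := by
      unfold pvF
      rw [hK, List.take_append_of_le_length hKle, List.drop_append_of_le_length hKle,
          List.append_assoc]
    simp only [pvStrip1, if_pos hew, hslice]
    refine ⟨hF.trans hq.1, Or.inl ⟨by simp, ?_⟩⟩
    rcases hq.2 with ⟨_, hlt⟩ | ⟨_, rfl, _⟩
    · simp at hlt ⊢; omega
    · simp; omega
  · simpa only [pvStrip1, if_neg hew] using hq

lemma pvStrip1_flag_false (st : List Char × List Char × Bool) (e : List Char)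
    (h : (pvStrip1 st e).2.2 = false) :
    pvStrip1 st e = st ∧ PySem.Chars.endswith st.1 e = false ∧ st.2.2 = false := by
  obtain ⟨s, en, f⟩ := st
  by_cases hew : PySem.Chars.endswith s e <;> simp [pvStrip1, hew] at h ⊢
  simp_all

lemma pvPassA_spec (s en : List Char) :
    pvF (pvPassA s en).1 (pvPassA s en).2.1 = pvF s en ∧
      ((pvPassA s en).2.2 = false → (pvPassA s en).1 = s ∧ (pvPassA s en).2.1 = en ∧ pvK s = s.length) ∧
      ((pvPassA s en).2.2 = true → (pvPassA s en).1.length < s.length) := by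
  have hfold : pvPassA s en =
      pvStrip1 (pvStrip1 (pvStrip1 (pvStrip1 (s, en, false) [' ']) ['*']) ['&'])
        ['c','o','n','s','t'] := by
    simp [pvPassA, pvTokens, List.foldl]
  have hq : pvQ s en (pvPassA s en) := by
    rw [hfold]
    apply pvStrip1_Q _ _ _ _ (by simp [pvTokens])
    apply pvStrip1_Q _ _ _ _ (by simp [pvTokens])
    apply pvStrip1_Q _ _ _ _ (by simp [pvTokens])
    apply pvStrip1_Q _ _ _ _ (by simp [pvTokens])
    exact ⟨rfl, Or.inr ⟨rfl, rfl, rfl⟩⟩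
  refine ⟨hq.1, ?_, ?_⟩
  · intro hfl
    rw [hfold] at hfl
    obtain ⟨e4, w4, f4⟩ := pvStrip1_flag_false _ _ hfl
    obtain ⟨e3, w3, f3⟩ := pvStrip1_flag_false _ _ f4
    obtain ⟨e2, w2, f2⟩ := pvStrip1_flag_false _ _ f3
    obtain ⟨e1, w1, _⟩ := pvStrip1_flag_false _ _ f2
    rw [e1] at e2 e3 e4 w2 w3 w4
    rw [e2] at e3 e4 w3 w4
    rw [e3] at e4 w4
    have hres : pvPassA s en = (s, en, false) := by rw [hfold, e1, e2, e3, e4]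
    have hfix : pvK s = s.length := by
      apply pvK_fix
      intro e he
      simp only [pvTokens, List.mem_cons, List.not_mem_nil, or_false] at he
      rcases he with rfl | rfl | rfl | rfl
      · exact w1
      · exact w2
      · exact w3
      · exact w4
    rw [hres]
    exact ⟨rfl, rfl, hfix⟩
  · intro hfl
    rcases hq.2 with ⟨_, hlt⟩ | ⟨hf, _, _⟩
    · exact hlt
    · rw [hfl] at hf; cases hf

lemma pvLoopA_eq (fuel : Nat) : ∀ (s en : List Char), s.length < fuel →
    pvLoopA fuel (s, en) = pvF s en := by
  induction fuel with
  | zero => intro s en h; omega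
  | succ f ih =>
    intro s en h
    obtain ⟨hF, hfix, hdec⟩ := pvPassA_spec s en
    rw [pvLoopA]
    rcases hp : pvPassA s en with ⟨s', en', fl⟩
    rw [hp] at hF hfix hdec
    simp only
    cases fl with
    | true =>
      rw [if_pos rfl]
      rw [ih s' en' (by have := hdec rfl; simp at this; omega)]
      simp only at hF
      exact hF
    | false =>
      rw [if_neg (by simp)]
      obtain ⟨rfl, rfl, hK⟩ := hfix rfl
      unfold pvF
      rw [hK, List.take_length, List.drop_length]
      simp

-- ===== VERDICT (by name: the statement is the Claim_ definition above) =====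
theorem type_and_decorators_spec : Claim_equal_type_and_decorators := by
  intro s _
  unfold Spec_type_and_decorators type_and_decorators type_and_decorators_alt
  simp only
  rw [pvLoopA_eq _ _ _ (by omega)]
  simp [pvF, pvK]
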